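-- pv_equiv track=rewrite | github.com/vibbits/gentle-hands-on-python | project/assemble.py | stripgaps
-- ===== SOURCE A (Python) =====
-- from typing import Callable, Tuple
--
-- GAP_CHARACTER = "-"
--
-- def stripgaps(reference: str, target: str) -> Tuple[str, str]:
--     """
--     Remove prefix and suffix inserts and delets.
--
--     For example:
--     >>> stripgaps("ATTGC---", "--TGCTTG")
--     ('TGC', 'TGC')
--
--     >>> stripgaps("GTCC", "GTGG")
--     ('GTCC', 'GTGG')
--     """
--     index = [
--         i
--         for i, (ref, tgt) in enumerate(zip(reference, target))
--         if all([ref != GAP_CHARACTER, tgt != GAP_CHARACTER])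
--     ]
--
--     if index:
--         return reference[index[0] : index[-1] + 1], target[index[0] : index[-1] + 1]
--
--     return "", ""
-- ===== SOURCE B (Python) =====
-- GAP_CHARACTER = "-"
--
--
-- def stripgaps(reference, target):
--     n = min(len(reference), len(target))
--     start = 0
--     while start < n and (reference[start] == GAP_CHARACTER or target[start] == GAP_CHARACTER):
--         start += 1
--     if start == n:
--         return "", ""
--     for end in range(n - 1, -1, -1):
--         if reference[end] != GAP_CHARACTER and target[end] != GAP_CHARACTER:
--             break
--     return reference[start:end + 1], target[start:end + 1]
-- ===== Notes on version B (the rewrite author's own statement) =====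
-- stated objective: faster
-- what changed: Instead of materialising the full list of all non-gap column indices and taking its first and last element, B keeps only two boundary indices: a forward scan finds the first column where both characters are non-gap and a backward scan finds the last, then both strings are sliced once.
import Mathlib
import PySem

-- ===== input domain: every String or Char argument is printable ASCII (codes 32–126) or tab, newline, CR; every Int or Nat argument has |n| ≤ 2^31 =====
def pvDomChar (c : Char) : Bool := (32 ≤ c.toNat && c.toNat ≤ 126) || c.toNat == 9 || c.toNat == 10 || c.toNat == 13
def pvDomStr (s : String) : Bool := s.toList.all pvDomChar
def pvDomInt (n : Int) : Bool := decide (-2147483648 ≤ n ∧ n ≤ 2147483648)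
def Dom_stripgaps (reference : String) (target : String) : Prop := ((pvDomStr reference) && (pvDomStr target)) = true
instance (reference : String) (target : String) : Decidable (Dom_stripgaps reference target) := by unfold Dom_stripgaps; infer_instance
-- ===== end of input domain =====

-- B replaces A's full list of non-gap column indices by two boundary scans (first and
-- last good column) and a single slice; objective: faster (constant-factor, O(1) extra space).


-- ===== PORT A =====
-- index = [i for i, (ref, tgt) in enumerate(zip(reference, target)) if all([ref != "-", tgt != "-"])]
-- if index: return reference[index[0]:index[-1]+1], target[index[0]:index[-1]+1]  (index[0]/index[-1] via pyGet?,
-- both `some` exactly when the list is non-empty, i.e. when Python's `if index:` is true); else ("", "")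
def stripgaps (reference : String) (target : String) : String × String :=
  let index := ((PySem.List.enumerate (reference.toList.zip target.toList) 0).filter
      (fun p => decide (p.2.1 ≠ '-') && decide (p.2.2 ≠ '-'))).map (fun p => p.1)
  match PySem.List.pyGet? index 0, PySem.List.pyGet? index (-1) with
  | some i0, some il =>
      (PySem.Str.slice reference (some i0) (some (il + 1)),
       PySem.Str.slice target (some i0) (some (il + 1)))
  | _, _ => ("", "")

-- ===== PORT B =====
-- while start < n and (reference[start] == "-" or target[start] == "-"): start += 1
def pvScanF (r t : List Char) (n i : Nat) : Nat :=
  if _h : i < n then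
    if r.getD i ' ' == '-' || t.getD i ' ' == '-' then pvScanF r t n (i + 1) else i
  else n
  termination_by n - i

-- for end in range(n-1, -1, -1): if reference[end] != "-" and target[end] != "-": break
-- (result = final value of `end`: the loop over j+1, j, …, 0 stops at the first good index, else ends at 0)
def pvScanB (r t : List Char) : Nat → Nat
  | 0 => 0
  | j + 1 => if r.getD (j + 1) ' ' != '-' && t.getD (j + 1) ' ' != '-' then j + 1 else pvScanB r t j

def stripgaps_alt (reference : String) (target : String) : String × String :=
  let r := reference.toList
  let t := target.toList
  let n := min r.length t.length
  let start := pvScanF r t n 0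
  if start = n then ("", "")
  else
    let e := pvScanB r t (n - 1)
    (PySem.Str.slice reference (some (start : Int)) (some ((e : Int) + 1)),
     PySem.Str.slice target (some (start : Int)) (some ((e : Int) + 1)))

-- ===== PRECONDITION & SPEC =====
def Spec_stripgaps (reference : String) (target : String) (out : String × String) : Prop := out = stripgaps_alt reference target
instance (reference : String) (target : String) (out : String × String) : Decidable (Spec_stripgaps reference target out) := by unfold Spec_stripgaps; infer_instance

-- ===== CLAIM (what is proved, stated in full; the proofs are below) =====
def Claim_equal_stripgaps : Prop := ∀ (reference : String) (target : String), Dom_stripgaps reference target → Spec_stripgaps reference target (stripgaps reference target)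

-- ===== LEMMAS AND PROOFS =====

-- the column predicate both scans decide
def pvOk (r t : List Char) (i : Nat) : Bool :=
  decide (r.getD i ' ' ≠ '-') && decide (t.getD i ' ' ≠ '-')

theorem pv_bool_aux (a b : Char) :
    (decide (a ≠ '-') && decide (b ≠ '-')) = !(a == '-' || b == '-') := by
  by_cases h1 : a = '-' <;> by_cases h2 : b = '-' <;> simp [h1, h2]

theorem pv_ok_not (r t : List Char) (i : Nat) :
    pvOk r t i = !(r.getD i ' ' == '-' || t.getD i ' ' == '-') := by
  unfold pvOk
  exact pv_bool_aux _ _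

theorem pv_enum_filter_map (P : Char × Char → Bool) (d : Char × Char) :
    ∀ (xs : List (Char × Char)) (s : Nat),
      ((PySem.List.enumerate xs (s : Int)).filter (fun p => P p.2)).map (fun p => p.1)
      = ((List.range' s xs.length).filter (fun i => P (xs.getD (i - s) d))).map
          (fun i : Nat => (i : Int)) := by
  intro xs
  induction xs with
  | nil => intro s; simp [PySem.List.enumerate_nil]
  | cons x xs ih =>
    intro s
    have hcast : (s : Int) + 1 = ((s + 1 : Nat) : Int) := by push_cast; ring
    have htail : (List.range' (s + 1) xs.length).filter
          (fun i => P ((x :: xs).getD (i - s) d))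
        = (List.range' (s + 1) xs.length).filter (fun i => P (xs.getD (i - (s + 1)) d)) := by
      apply List.filter_congr
      intro i hi
      have hs : s + 1 ≤ i := (List.mem_range'_1.mp hi).1
      have : i - s = (i - (s + 1)) + 1 := by omega
      rw [this, List.getD_cons_succ]
    rw [PySem.List.enumerate_cons, List.length_cons, List.range'_succ]
    cases hPx : P x with
    | true =>
      simp only [List.filter_cons, Nat.sub_self, List.getD_cons_zero, hPx, if_pos, List.map_cons]
      rw [hcast, ih (s + 1), ← htail]
    | false =>
      simp only [List.filter_cons, Nat.sub_self, List.getD_cons_zero, hPx]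
      simp only [Bool.false_eq_true, if_false]
      rw [hcast, ih (s + 1), ← htail]

theorem pv_scanF_eq (r t : List Char) :
    ∀ n i, pvScanF r t n i = ((List.range' i (n - i)).filter (pvOk r t)).headD n := by
  intro n
  have key : ∀ k i, n - i = k →
      pvScanF r t n i = ((List.range' i (n - i)).filter (pvOk r t)).headD n := by
    intro k
    induction k with
    | zero =>
      intro i hk
      have hni : ¬ i < n := by omega
      rw [pvScanF, dif_neg hni, hk]
      simp
    | succ k ih =>
      intro i hk
      have hin : i < n := by omega
      rw [pvScanF, dif_pos hin, hk, List.range'_succ, List.filter_cons]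
      cases hcond : (r.getD i ' ' == '-' || t.getD i ' ' == '-') with
      | true =>
        have hok : pvOk r t i = false := by rw [pv_ok_not, hcond]; rfl
        rw [hok]
        have := ih (i + 1) (by omega)
        rw [this]
        have : n - (i + 1) = k := by omega
        simp [this]
      | false =>
        have hok : pvOk r t i = true := by rw [pv_ok_not, hcond]; rfl
        rw [hok]
        simp
  intro i; exact key (n - i) i rfl

theorem pv_scanB_eq (r t : List Char) :
    ∀ j, pvScanB r t j = ((List.range (j + 1)).filter (pvOk r t)).getLastD 0 := by
  intro j
  induction j with
  | zero =>
    cases h : pvOk r t 0 <;> simp [pvScanB, List.range_succ, h]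
  | succ j ih =>
    rw [List.range_succ, List.filter_append]
    have hcond : (r.getD (j + 1) ' ' != '-' && t.getD (j + 1) ' ' != '-') = pvOk r t (j + 1) := by
      rw [pv_ok_not]; simp [bne, Bool.not_or]
    cases h : pvOk r t (j + 1) with
    | true =>
      rw [pvScanB, hcond, h]
      simp [h]
    | false =>
      rw [pvScanB, hcond, h]
      simp only [Bool.false_eq_true, if_false, List.filter_cons, h, List.filter_nil,
        List.append_nil]
      exact ih

-- ===== VERDICT (by name: the statement is the Claim_ definition above) =====
theorem stripgaps_spec : Claim_equal_stripgaps := by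
  intro reference target _
  unfold Spec_stripgaps
  simp only [stripgaps, stripgaps_alt]
  set r := reference.toList with hr
  set t := target.toList with ht
  set n := min r.length t.length with hn
  have hzlen : (r.zip t).length = n := by simp [hn]
  have hidx : ((PySem.List.enumerate (r.zip t) 0).filter
        (fun p => decide (p.2.1 ≠ '-') && decide (p.2.2 ≠ '-'))).map (fun p => p.1)
      = ((List.range n).filter (pvOk r t)).map (fun i : Nat => (i : Int)) := by
    have h0 := pv_enum_filter_map (fun q => decide (q.1 ≠ '-') && decide (q.2 ≠ '-'))
      (' ', ' ') (r.zip t) 0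
    rw [Nat.cast_zero] at h0
    rw [h0, hzlen, ← List.range_eq_range']
    congr 1
    apply List.filter_congr
    intro i hi
    have hin : i < n := List.mem_range.mp hi
    have hir : i < r.length := lt_of_lt_of_le hin (min_le_left _ _)
    have hit : i < t.length := lt_of_lt_of_le hin (min_le_right _ _)
    have hiz : i < (r.zip t).length := by rwa [hzlen]
    simp only [Nat.sub_zero]
    unfold pvOk
    simp only [List.getD_eq_getElem _ _ hiz, List.getElem_zip,
      List.getD_eq_getElem _ _ hir, List.getD_eq_getElem _ _ hit]
  rw [hidx, pv_scanF_eq r t n 0, Nat.sub_zero, List.range_eq_range']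
  cases hF : (List.range' 0 n).filter (pvOk r t) with
  | nil =>
    simp [PySem.List.pyGet?_zero]
  | cons f0 F' =>
    have hf0 : f0 < n := by
      have : f0 ∈ (List.range' 0 n).filter (pvOk r t) := by rw [hF]; exact List.mem_cons_self
      have := List.mem_filter.mp this
      simpa [← List.range_eq_range', List.mem_range] using this.1
    have hstart : (f0 :: F').headD n = f0 := rfl
    have hne : ¬ ((f0 :: F').headD n = n) := by rw [hstart]; omega
    have hlast : (List.map (fun i : Nat => (i : Int)) (f0 :: F')).getLast?
        = some (((f0 :: F').getLastD 0 : Nat) : Int) := by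
      rw [List.getLast?_map]
      cases h : (f0 :: F').getLast? with
      | none => simp at h
      | some a => simp [h]
    have he : pvScanB r t (n - 1) = (f0 :: F').getLastD 0 := by
      rw [pv_scanB_eq]
      have : n - 1 + 1 = n := by omega
      rw [this, List.range_eq_range', hF]
    have hlast2 : PySem.List.pyGet? ((f0 : Int) :: F'.map (fun i : Nat => (i : Int))) (-1)
        = some (((f0 :: F').getLastD 0 : Nat) : Int) := by
      rw [PySem.List.pyGet?_neg_one]
      simpa using hlast
    rw [if_neg hne]
    simp only [PySem.List.pyGet?_zero_cons, List.map_cons]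
    rw [hlast2, hstart, he]
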